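-- pv_equiv track=rewrite | github.com/jncc/image-catalogue | image_prep/etl_tool/Survey Analysis to Metadata Sheet.py | split_MNCR
-- ===== SOURCE A (Python) =====
-- def split_MNCR(code):
--     """
--     Splits up a MNCR code into each of it hierarchical layers
--     :param code: MNCR code to split
--     :return: Split up code
--     """
--     code = code[0]
--     try:
--         assert isinstance(code, str), 'MNCR code not understood'
--     except AssertionError:
--         return None
--     split = ''
--     cache = ''
--     for group in code.split('.'):
--         if cache != '':
--             cache += '.'
--         cache += group
--         if split != '':
--             split += '|'
--         split += cache
--     return split
-- ===== SOURCE B (Python) =====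
-- def split_MNCR(code):
--     """
--     Splits up a MNCR code into each of its hierarchical layers
--     :param code: MNCR code to split
--     :return: Split up code
--     """
--     code = code[0]
--     if not isinstance(code, str):
--         return None
--     parts = code.split('.')
--     return '|'.join('.'.join(parts[:i + 1]) for i in range(len(parts)))
-- ===== Notes on version B (the rewrite author's own statement) =====
-- stated objective: simpler
-- what changed: Replaces the dual running string accumulators (split/cache) with independent computation of each hierarchical prefix by slicing the split parts list and joining, so no state is carried between iterations.
-- intended difference: On inputs whose first string starts with '.', A's empty-string checks on its running accumulators silently drop the empty leading hierarchy levels and their separators (A returns e.g. 'a' for '.a'), while B returns every cumulative prefix ('|.a'), which is the intended 'one prefix per level' output. — e.g. on split_MNCR([".a"]): A returns some "a", B returns some "|.a"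
import Mathlib
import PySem

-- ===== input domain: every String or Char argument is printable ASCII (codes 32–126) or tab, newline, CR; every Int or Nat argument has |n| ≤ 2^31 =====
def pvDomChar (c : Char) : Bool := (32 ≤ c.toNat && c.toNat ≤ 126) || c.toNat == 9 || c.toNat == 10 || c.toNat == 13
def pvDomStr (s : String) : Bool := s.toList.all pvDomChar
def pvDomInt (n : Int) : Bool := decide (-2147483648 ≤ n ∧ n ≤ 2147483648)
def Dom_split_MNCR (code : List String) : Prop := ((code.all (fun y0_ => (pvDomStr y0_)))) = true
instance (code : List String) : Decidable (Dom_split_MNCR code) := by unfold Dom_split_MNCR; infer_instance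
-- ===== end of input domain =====

-- B replaces A's two running string accumulators (split/cache) by computing each hierarchical
-- prefix independently from a slice of the split parts list (objective: simpler, stateless).

-- ===== PORT A =====
def split_MNCR (code : List String) : Option String :=
  match PySem.List.pyGet? code 0 with
  | none => none  -- IndexError on code[0]; excluded by Pre_split_MNCR
  | some c =>
    -- 'assert isinstance(code, str)' always succeeds here: the element is a String
    let st := (PySem.Chars.splitOn c.toList ['.']).foldl
      (fun (st : List Char × List Char) group =>
        let cache := (if st.2 = [] then st.2 else st.2 ++ ['.']) ++ group
        let split := (if st.1 = [] then st.1 else st.1 ++ ['|']) ++ cache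
        (split, cache)) ([], [])
    some (String.ofList st.1)

-- ===== PORT B =====
def split_MNCR_alt (code : List String) : Option String :=
  match PySem.List.pyGet? code 0 with
  | none => none  -- IndexError on code[0]
  | some c =>
    let parts := PySem.Chars.splitOn c.toList ['.']
    some (String.ofList (PySem.Chars.join ['|']
      ((PySem.List.pyRange 0 (PySem.List.len parts) 1).map
        (fun i => PySem.Chars.join ['.'] (PySem.List.slice parts none (some (i + 1)))))))

-- ===== PRECONDITION & SPEC =====
-- Pre_ excludes only the empty list, on which A raises IndexError at code[0].
def Pre_split_MNCR (code : List String) : Prop := code ≠ []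
instance (code : List String) : Decidable (Pre_split_MNCR code) := by unfold Pre_split_MNCR; infer_instance
def pvWitness_split_MNCR : List String := ["a.b.c"]

-- On inputs whose first string starts with '.', A's empty-string checks on its running
-- accumulators silently drop the empty leading hierarchy levels and their separators
-- (A returns e.g. "a" for ".a"), while B returns every cumulative prefix ("|.a"),
-- which is the intended one-prefix-per-level output.
def D_split_MNCR (code : List String) : Prop :=
  (match code with
   | [] => false
   | c :: _ => PySem.Str.startswith c ".") = true
instance (code : List String) : Decidable (D_split_MNCR code) := by unfold D_split_MNCR; infer_instance

def Spec_split_MNCR (code : List String) (out : Option String) : Prop :=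
  ¬ D_split_MNCR code → out = split_MNCR_alt code
instance (code : List String) (out : Option String) : Decidable (Spec_split_MNCR code out) := by
  unfold Spec_split_MNCR; infer_instance

def pvDiffWitness_split_MNCR : List String := [".a"]
def pvDiffWitnessOut_split_MNCR : (Option String) × (Option String) := (some "a", some "|.a")

-- ===== CLAIM (what is proved, stated in full; the proofs are below) =====
def Claim_unchanged_split_MNCR : Prop := ∀ (code : List String), Dom_split_MNCR code →
  Pre_split_MNCR code → Spec_split_MNCR code (split_MNCR code)
def Claim_changed_split_MNCR : Prop := Dom_split_MNCR (pvDiffWitness_split_MNCR) ∧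
  Pre_split_MNCR (pvDiffWitness_split_MNCR) ∧ D_split_MNCR (pvDiffWitness_split_MNCR) ∧
  split_MNCR (pvDiffWitness_split_MNCR) = pvDiffWitnessOut_split_MNCR.1 ∧
  split_MNCR_alt (pvDiffWitness_split_MNCR) = pvDiffWitnessOut_split_MNCR.2 ∧
  pvDiffWitnessOut_split_MNCR.1 ≠ pvDiffWitnessOut_split_MNCR.2

-- ===== LEMMAS AND PROOFS =====

-- A's loop step (definitionally equal to the lambda inside the port of A)
def pvStep (st : List Char × List Char) (group : List Char) : List Char × List Char :=
  let cache := (if st.2 = [] then st.2 else st.2 ++ ['.']) ++ group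
  let split := (if st.1 = [] then st.1 else st.1 ++ ['|']) ++ cache
  (split, cache)

-- B's prefix list, after bridging pyRange/slice to range/take
def pvPrefixes (parts : List (List Char)) : List (List Char) :=
  (List.range parts.length).map (fun i => PySem.Chars.join ['.'] (parts.take (i + 1)))

-- splitOn.go only appends to its accumulator argument
theorem pv_go_acc (sep : List Char) :
    ∀ (fuel : Nat) (l cur : List Char) (acc : List (List Char)),
      PySem.Chars.splitOn.go sep fuel l cur acc =
        acc.reverse ++ PySem.Chars.splitOn.go sep fuel l cur [] := by
  intro fuel
  induction fuel with
  | zero => intro l cur acc; simp [PySem.Chars.splitOn.go.eq_1]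
  | succ n ih =>
    intro l cur acc
    cases l with
    | nil => rw [PySem.Chars.splitOn.go.eq_2 _ _ _ _ (by omega),
                 PySem.Chars.splitOn.go.eq_2 _ _ _ _ (by omega)]; simp
    | cons c rest =>
      rw [PySem.Chars.splitOn.go.eq_3, PySem.Chars.splitOn.go.eq_3]
      by_cases h : sep.isPrefixOf (c :: rest)
      · rw [if_pos h, if_pos h, ih _ _ (cur.reverse :: acc), ih _ _ [cur.reverse]]
        simp
      · rw [if_neg h, if_neg h]; exact ih _ _ acc

-- the first piece produced by splitOn.go starts with cur.reverse
theorem pv_go_head (sep : List Char) :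
    ∀ (fuel : Nat) (l cur : List Char),
      ∃ t, (PySem.Chars.splitOn.go sep fuel l cur []).head? = some (cur.reverse ++ t) := by
  intro fuel
  induction fuel with
  | zero => intro l cur; exact ⟨l, by simp [PySem.Chars.splitOn.go.eq_1]⟩
  | succ n ih =>
    intro l cur
    cases l with
    | nil => exact ⟨[], by rw [PySem.Chars.splitOn.go.eq_2 _ _ _ _ (by omega)]; simp⟩
    | cons c rest =>
      rw [PySem.Chars.splitOn.go.eq_3]
      by_cases h : sep.isPrefixOf (c :: rest)
      · refine ⟨[], ?_⟩
        rw [if_pos h, pv_go_acc]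
        simp
      · obtain ⟨t, ht⟩ := ih rest (c :: cur)
        refine ⟨c :: t, ?_⟩
        rw [if_neg h, ht]
        simp

-- the first piece of splitOn is nonempty when the string is nonempty and does not start with sep
theorem pv_splitOn_head (c : List Char) (hc : c ≠ []) (hns : ¬ ['.'].isPrefixOf c) :
    ∃ p, (PySem.Chars.splitOn c ['.']).head? = some p ∧ p ≠ [] := by
  cases c with
  | nil => exact absurd rfl hc
  | cons ch rest =>
    show ∃ p, (PySem.Chars.splitOn.go ['.'] ((ch :: rest).length + 1) (ch :: rest) [] []).head? = some p ∧ p ≠ []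
    rw [show (ch :: rest).length + 1 = (rest.length + 1) + 1 by simp,
        PySem.Chars.splitOn.go.eq_3, if_neg hns]
    obtain ⟨t, ht⟩ := pv_go_head ['.'] (rest.length + 1) rest [ch]
    exact ⟨ch :: t, by simpa using ht, by simp⟩

theorem pv_join_append_singleton (sep : List Char) (ps : List (List Char)) (g : List Char)
    (h : ps ≠ []) : PySem.Chars.join sep (ps ++ [g]) = PySem.Chars.join sep ps ++ sep ++ g := by
  induction ps with
  | nil => exact absurd rfl h
  | cons p ps ih =>
    cases ps with
    | nil => simp [PySem.Chars.join_cons_cons, PySem.Chars.join_singleton]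
    | cons q qs =>
      rw [List.cons_append, List.cons_append, PySem.Chars.join_cons_cons,
          PySem.Chars.join_cons_cons, ← List.cons_append, ih (by simp)]
      simp

theorem pv_join_cons_ne_nil (sep : List Char) (p : List Char) (ps : List (List Char))
    (hp : p ≠ []) : PySem.Chars.join sep (p :: ps) ≠ [] := by
  cases ps with
  | nil => simpa [PySem.Chars.join_singleton] using hp
  | cons q qs => simp [PySem.Chars.join_cons_cons, hp]

theorem pv_prefixes_append (ps : List (List Char)) (g : List Char) :
    pvPrefixes (ps ++ [g]) = pvPrefixes ps ++ [PySem.Chars.join ['.'] (ps ++ [g])] := by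
  unfold pvPrefixes
  rw [List.length_append, List.length_singleton, List.range_succ, List.map_append]
  congr 1
  · exact List.map_congr_left (fun i hi => by
      rw [List.take_append_of_le_length (by simpa using List.mem_range.mp hi)])
  · simp [List.take_of_length_le]

theorem pv_prefixes_head (p0 : List Char) (tail : List (List Char)) :
    pvPrefixes (p0 :: tail) = p0 :: (pvPrefixes (p0 :: tail)).tail := by
  unfold pvPrefixes
  rw [List.length_cons, List.range_succ_eq_map, List.map_cons]
  simp [PySem.Chars.join_singleton]

-- core: A's fold equals (join of B's prefixes, join of parts) when the first part is nonempty
theorem pv_fold_eq (p0 : List Char) (hp0 : p0 ≠ []) :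
    ∀ (parts : List (List Char)), parts.head? = some p0 →
      parts.foldl pvStep ([], []) =
        (PySem.Chars.join ['|'] (pvPrefixes parts), PySem.Chars.join ['.'] parts) := by
  intro parts
  induction parts using List.reverseRecOn with
  | nil => intro h; simp at h
  | append_singleton ps g ih =>
    intro h
    cases ps with
    | nil =>
      simp only [List.nil_append, List.head?_cons, Option.some.injEq] at h
      subst h
      simp [pvStep, pvPrefixes, PySem.Chars.join_singleton]
    | cons q qs =>
      have hq : q = p0 := by simpa using h
      subst hq
      have hps : (q :: qs).head? = some q := rfl
      rw [List.foldl_append, ih hps]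
      have hJD : PySem.Chars.join ['.'] (q :: qs) ≠ [] := pv_join_cons_ne_nil _ _ _ hp0
      have hJPhead := pv_prefixes_head q qs
      have hJP : PySem.Chars.join ['|'] (pvPrefixes (q :: qs)) ≠ [] := by
        rw [hJPhead]; exact pv_join_cons_ne_nil _ _ _ hp0
      show pvStep _ g = _
      unfold pvStep
      rw [pv_prefixes_append,
          pv_join_append_singleton ['.'] (q :: qs) g (by simp),
          pv_join_append_singleton ['|'] (pvPrefixes (q :: qs)) _
            (by rw [hJPhead]; simp)]
      simp [if_neg hJD, if_neg hJP, List.append_assoc]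

-- bridge B's pyRange/slice expression to pvPrefixes
theorem pv_alt_eq_prefixes (parts : List (List Char)) :
    PySem.Chars.join ['|']
      ((PySem.List.pyRange 0 (PySem.List.len parts) 1).map
        (fun i => PySem.Chars.join ['.'] (PySem.List.slice parts none (some (i + 1))))) =
    PySem.Chars.join ['|'] (pvPrefixes parts) := by
  rw [PySem.List.len_eq, PySem.List.pyRange_zero_natCast, List.map_map]
  unfold pvPrefixes
  congr 1
  refine List.map_congr_left (fun i _ => ?_)
  show PySem.Chars.join ['.'] (PySem.List.slice parts none (some ((i : Int) + 1))) = _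
  rw [show ((i : Int) + 1) = ((i + 1 : Nat) : Int) by push_cast; ring,
      PySem.List.slice_to parts (by positivity), Int.toNat_natCast]

theorem pv_main : ∀ (code : List String), Pre_split_MNCR code →
    ¬ D_split_MNCR code → split_MNCR code = split_MNCR_alt code := by
  intro code hpre hnd
  unfold Pre_split_MNCR at hpre
  unfold D_split_MNCR at hnd
  cases code with
  | nil => exact absurd rfl hpre
  | cons c cs =>
    have hsw : PySem.Str.startswith c "." = false := by
      simpa using hnd
    unfold split_MNCR split_MNCR_alt
    rw [PySem.List.pyGet?_zero_cons]
    simp only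
    rw [pv_alt_eq_prefixes]
    have hA : (PySem.Chars.splitOn c.toList ['.']).foldl
        (fun (st : List Char × List Char) group =>
          let cache := (if st.2 = [] then st.2 else st.2 ++ ['.']) ++ group
          let split := (if st.1 = [] then st.1 else st.1 ++ ['|']) ++ cache
          (split, cache)) ([], []) =
        (PySem.Chars.splitOn c.toList ['.']).foldl pvStep ([], []) := rfl
    rw [hA]
    cases hcl : c.toList with
    | nil =>
      rw [show PySem.Chars.splitOn [] ['.'] = [[]] from rfl]
      rfl
    | cons ch rest =>
      have hns : ¬ ['.'].isPrefixOf (ch :: rest) := by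
        intro hpf
        have hswC : PySem.Chars.startswith c.toList ['.'] = false := by
          simpa [PySem.Str.startswith_eq] using hsw
        have hsw' : PySem.Chars.startswith c.toList ['.'] = true :=
          (PySem.Chars.startswith_iff _ _).mpr
            (List.isPrefixOf_iff_prefix.mp (by rw [hcl]; exact hpf))
        rw [hsw'] at hswC
        simp at hswC
      obtain ⟨p, hp, hpne⟩ := pv_splitOn_head (ch :: rest) (by simp) hns
      rw [pv_fold_eq p hpne _ hp]

-- ===== VERDICT (by name: the statement is the Claim_ definition above) =====
theorem split_MNCR_spec : Claim_unchanged_split_MNCR := by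
  intro code _ hpre hnd
  exact pv_main code hpre hnd

theorem split_MNCR_changed : Claim_changed_split_MNCR := by
  unfold Claim_changed_split_MNCR; decide
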